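-- pv_equiv track=rewrite | github.com/nbarker2021/Aletheia2 | layer4_governance/tqf/formula_segments.py | is_cabtaxi
-- ===== SOURCE A (Python) =====
-- from typing import Dict, Any, Tuple
-- from typing import List, Tuple
-- from typing import List, Dict, Any, Tuple
-- from typing import Tuple, Optional
--
-- def is_cabtaxi(n: int, bound: int=100) -> Optional[Tuple[Tuple[int,int],Tuple[int,int]]]:
--     """
--     Signed extension: allow negatives. Returns witness pairs if found.
--     """
--     sums = {}
--     for a in range(-bound, bound+1):
--         for b in range(abs(a), bound+1):
--             s = a*a*a + b*b*b
--             if s == n: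
--                 if s in sums and sums[s] != (a,b):
--                     return (sums[s], (a,b))
--                 sums[s] = (a,b)
--     return None
-- ===== SOURCE B (Python) =====
-- def _icbrt(m):
--     # integer cube root of m >= 0 by binary search
--     lo, hi = 0, m
--     while lo < hi:
--         mid = (lo + hi + 1) // 2
--         if mid * mid * mid <= m:
--             lo = mid
--         else:
--             hi = mid - 1
--     return lo
--
--
-- def is_cabtaxi(n, bound=100):
--     first = None
--     for a in range(-bound, bound + 1):
--         t = n - a * a * a
--         if t < 0:
--             continue
--         b = _icbrt(t)
--         if b * b * b == t and abs(a) <= b <= bound: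
--             if first is not None and first != (a, b):
--                 return (first, (a, b))
--             first = (a, b)
--     return None
-- ===== Notes on version B (the rewrite author's own statement) =====
-- stated objective: faster
-- what changed: Replaces A's inner scan of all b in [|a|,bound] by a direct integer-cube-root lookup b=icbrt(n-a^3) verified and range-checked, so each a costs O(log) instead of O(bound).
import Mathlib
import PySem

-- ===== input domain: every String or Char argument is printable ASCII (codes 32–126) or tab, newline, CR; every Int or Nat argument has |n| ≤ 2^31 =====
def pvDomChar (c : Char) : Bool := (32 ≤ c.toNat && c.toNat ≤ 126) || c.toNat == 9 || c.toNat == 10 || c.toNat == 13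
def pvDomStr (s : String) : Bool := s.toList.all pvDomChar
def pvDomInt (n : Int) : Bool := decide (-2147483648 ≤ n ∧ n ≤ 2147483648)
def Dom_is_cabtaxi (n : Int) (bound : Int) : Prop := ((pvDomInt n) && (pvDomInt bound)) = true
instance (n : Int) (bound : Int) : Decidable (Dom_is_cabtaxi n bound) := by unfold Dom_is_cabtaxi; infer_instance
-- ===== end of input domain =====

-- B replaces A's inner scan over b by a direct integer-cube-root lookup (binary search), asymptotically faster.


-- ===== PORT A =====
-- inner 'for b in range(abs(a), bound+1)' loop; returns .inl on A's early 'return', else the updated dict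
def cabInnerA (n a : Int) (bs : List Int) (sums : PySem.Dict Int (Int × Int)) :
    Sum ((Int × Int) × (Int × Int)) (PySem.Dict Int (Int × Int)) :=
  match bs with
  | [] => .inr sums
  | b :: rest =>
    let s := a * a * a + b * b * b
    if s = n then
      match sums.get? s with
      | some p => if p ≠ (a, b) then .inl (p, (a, b)) else cabInnerA n a rest (sums.insert s (a, b))
      | none => cabInnerA n a rest (sums.insert s (a, b))
    else cabInnerA n a rest sums

-- outer 'for a in range(-bound, bound+1)' loop
def cabOuterA (n bound : Int) (as_ : List Int) (sums : PySem.Dict Int (Int × Int)) :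
    Option ((Int × Int) × (Int × Int)) :=
  match as_ with
  | [] => none
  | a :: rest =>
    match cabInnerA n a (PySem.List.pyRange |a| (bound + 1) 1) sums with
    | .inl r => some r
    | .inr sums' => cabOuterA n bound rest sums'

def is_cabtaxi (n : Int) (bound : Int) : Option ((Int × Int) × (Int × Int)) :=
  cabOuterA n bound (PySem.List.pyRange (-bound) (bound + 1) 1) PySem.Dict.empty

-- ===== PORT B =====
-- _icbrt's binary-search loop (m ≥ 0)
-- termination facts for the binary-search loop (named so the loop can cite them)
theorem icbrtDec₁ (lo hi : Int) (h : lo < hi) :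
    (hi - PySem.Int.floordiv (lo + hi + 1) 2).toNat < (hi - lo).toNat := by
  have h2 : PySem.Int.floordiv (lo + hi + 1) 2 = (lo + hi + 1) / 2 :=
    PySem.Int.floordiv_eq_ediv_of_pos (by omega)
  omega

theorem icbrtDec₂ (lo hi : Int) (h : lo < hi) :
    (PySem.Int.floordiv (lo + hi + 1) 2 - 1 - lo).toNat < (hi - lo).toNat := by
  have h2 : PySem.Int.floordiv (lo + hi + 1) 2 = (lo + hi + 1) / 2 :=
    PySem.Int.floordiv_eq_ediv_of_pos (by omega)
  omega

def icbrtLoop (m lo hi : Int) : Int :=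
  if h : lo < hi then
    let mid := PySem.Int.floordiv (lo + hi + 1) 2
    if mid * mid * mid ≤ m then icbrtLoop m mid hi else icbrtLoop m lo (mid - 1)
  else lo
termination_by (hi - lo).toNat
decreasing_by
  · exact icbrtDec₁ lo hi h
  · exact icbrtDec₂ lo hi h

def icbrt (m : Int) : Int := icbrtLoop m 0 m

-- B's single 'for a' loop; 'first' is the first representation found so far
def cabLoopB (n bound : Int) (as_ : List Int) (first : Option (Int × Int)) :
    Option ((Int × Int) × (Int × Int)) :=
  match as_ with
  | [] => none
  | a :: rest =>
    let t := n - a * a * a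
    if t < 0 then cabLoopB n bound rest first
    else
      let b := icbrt t
      if b * b * b = t ∧ |a| ≤ b ∧ b ≤ bound then
        match first with
        | some p => if p ≠ (a, b) then some (p, (a, b)) else cabLoopB n bound rest (some (a, b))
        | none => cabLoopB n bound rest (some (a, b))
      else cabLoopB n bound rest first

def is_cabtaxi_alt (n : Int) (bound : Int) : Option ((Int × Int) × (Int × Int)) :=
  cabLoopB n bound (PySem.List.pyRange (-bound) (bound + 1) 1) none

-- ===== PRECONDITION & SPEC =====
def Spec_is_cabtaxi (n : Int) (bound : Int) (out : Option ((Int × Int) × (Int × Int))) : Prop := out = is_cabtaxi_alt n bound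
instance (n : Int) (bound : Int) (out : Option ((Int × Int) × (Int × Int))) : Decidable (Spec_is_cabtaxi n bound out) := by unfold Spec_is_cabtaxi; infer_instance

-- ===== CLAIM (what is proved, stated in full; the proofs are below) =====
def Claim_equal_is_cabtaxi : Prop := ∀ (n : Int) (bound : Int), Dom_is_cabtaxi n bound → Spec_is_cabtaxi n bound (is_cabtaxi n bound)

-- ===== LEMMAS AND PROOFS =====

theorem cube_lt {x y : Int} (h : x < y) : x * x * x < y * y * y := by
  nlinarith [sq_nonneg (x + y), sq_nonneg x, sq_nonneg y, sq_nonneg (x - y)]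

theorem cube_le {x y : Int} (h : x ≤ y) : x * x * x ≤ y * y * y := by
  rcases lt_or_eq_of_le h with h' | h'
  · exact le_of_lt (cube_lt h')
  · rw [h']

theorem cube_inj {x y : Int} (h : x * x * x = y * y * y) : x = y := by
  rcases lt_trichotomy x y with h' | h' | h'
  · exact absurd h (ne_of_lt (cube_lt h'))
  · exact h'
  · exact absurd h.symm (ne_of_lt (cube_lt h'))

theorem icbrtLoop_inv (m c : Int) (hlb : c * c * c ≤ m) (hub : m < (c+1) * (c+1) * (c+1)) :
    ∀ k lo hi, (hi - lo).toNat = k → lo ≤ c → c ≤ hi → icbrtLoop m lo hi = c := by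
  intro k
  induction k using Nat.strong_induction_on with
  | _ k ih =>
    intro lo hi hk h1 h2
    rw [icbrtLoop]
    split
    · next hlt =>
      have hfd : PySem.Int.floordiv (lo + hi + 1) 2 = (lo + hi + 1) / 2 :=
        PySem.Int.floordiv_eq_ediv_of_pos (by omega)
      have hb1 : lo + 1 ≤ PySem.Int.floordiv (lo + hi + 1) 2 := by rw [hfd]; omega
      have hb2 : PySem.Int.floordiv (lo + hi + 1) 2 ≤ hi := by rw [hfd]; omega
      show (if PySem.Int.floordiv (lo + hi + 1) 2 * PySem.Int.floordiv (lo + hi + 1) 2 *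
              PySem.Int.floordiv (lo + hi + 1) 2 ≤ m then
              icbrtLoop m (PySem.Int.floordiv (lo + hi + 1) 2) hi
            else icbrtLoop m lo (PySem.Int.floordiv (lo + hi + 1) 2 - 1)) = c
      set mid := PySem.Int.floordiv (lo + hi + 1) 2 with hmid
      split
      · next hle =>
        have hmc : mid ≤ c := by
          by_contra hcon
          push_neg at hcon
          have : (c+1) * (c+1) * (c+1) ≤ mid * mid * mid := cube_le (by omega)
          omega
        exact ih (hi - mid).toNat (by omega) mid hi rfl hmc h2
      · next hgt =>
        push_neg at hgt
        have hmc : c ≤ mid - 1 := by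
          by_contra hcon
          push_neg at hcon
          have : mid * mid * mid ≤ c * c * c := cube_le (by omega)
          omega
        exact ih (mid - 1 - lo).toNat (by omega) lo (mid - 1) rfl h1 hmc
    · next hge => omega

theorem icbrt_cube (c : Int) (hc : 0 ≤ c) : icbrt (c * c * c) = c := by
  have hcc : c ≤ c * c * c := by
    rcases (by omega : c = 0 ∨ 1 ≤ c) with h | h
    · simp [h]
    · nlinarith
  exact icbrtLoop_inv (c * c * c) c le_rfl (cube_lt (by omega)) _ 0 (c * c * c) rfl hc hcc

-- if no b in bs matches, A's inner loop falls through with the dict unchanged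
theorem cabInnerA_no_match (n a : Int) (bs : List Int)
    (h : ∀ b ∈ bs, a * a * a + b * b * b ≠ n) (sums : PySem.Dict Int (Int × Int)) :
    cabInnerA n a bs sums = .inr sums := by
  induction bs with
  | nil => rfl
  | cons b rest ih =>
    show (if a * a * a + b * b * b = n then _ else cabInnerA n a rest sums) = _
    rw [if_neg (h b (List.mem_cons_self))]
    exact ih (fun b' hb' => h b' (List.mem_cons_of_mem _ hb'))

-- characterization of A's inner loop by the (unique) matching b
theorem cabInnerA_eq (n a : Int) (bs : List Int) (hnd : bs.Nodup)
    (sums : PySem.Dict Int (Int × Int)) :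
    cabInnerA n a bs sums =
      match bs.find? (fun b => a * a * a + b * b * b == n) with
      | none => .inr sums
      | some b =>
        match sums.get? n with
        | some p => if p ≠ (a, b) then .inl (p, (a, b)) else .inr (sums.insert n (a, b))
        | none => .inr (sums.insert n (a, b)) := by
  induction bs generalizing sums with
  | nil => rfl
  | cons b rest ih =>
    rcases List.nodup_cons.mp hnd with ⟨hnm, hndr⟩
    by_cases hb : a * a * a + b * b * b = n
    · have hnorest : ∀ b' ∈ rest, a * a * a + b' * b' * b' ≠ n := by
        intro b' hb' hcon
        have : b' = b := cube_inj (by omega)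
        exact hnm (this ▸ hb')
      rw [List.find?_cons_of_pos (by simpa using hb)]
      show (if a * a * a + b * b * b = n then
              match sums.get? (a * a * a + b * b * b) with
              | some p => if p ≠ (a, b) then Sum.inl (p, (a, b))
                          else cabInnerA n a rest (sums.insert (a * a * a + b * b * b) (a, b))
              | none => cabInnerA n a rest (sums.insert (a * a * a + b * b * b) (a, b))
            else cabInnerA n a rest sums) = _
      rw [if_pos hb, hb]
      cases hg : sums.get? n with
      | some p =>
        by_cases hp : p = (a, b)
        · simp [hp, cabInnerA_no_match n a rest hnorest]
        · simp [hp]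
      | none => simp [cabInnerA_no_match n a rest hnorest]
    · rw [List.find?_cons_of_neg (by simpa using hb)]
      show (if a * a * a + b * b * b = n then _ else cabInnerA n a rest sums) = _
      rw [if_neg hb]
      exact ih hndr sums

-- the two outer loops agree when the dict's entry at n equals B's 'first'
theorem outer_eq (n bound : Int) (as_ : List Int) :
    ∀ (sums : PySem.Dict Int (Int × Int)) (first : Option (Int × Int)),
      sums.get? n = first →
      cabOuterA n bound as_ sums = cabLoopB n bound as_ first := by
  induction as_ with
  | nil => intro sums first _; rfl
  | cons a rest ih =>
    intro sums first hrel
    rw [cabOuterA, cabLoopB]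
    rw [cabInnerA_eq n a _ (PySem.List.nodup_pyRange_one _ _) sums]
    cases hf : (PySem.List.pyRange |a| (bound + 1) 1).find? (fun b => a * a * a + b * b * b == n) with
    | none =>
      have hnob : ∀ b ∈ PySem.List.pyRange |a| (bound + 1) 1,
          ¬ (a * a * a + b * b * b = n) := by
        intro b hb
        have := List.find?_eq_none.mp hf b hb
        simpa using this
      simp only
      split
      · exact ih sums first hrel
      · next ht =>
        push_neg at ht
        split
        · next hc =>
          exfalso
          obtain ⟨hc1, hc2, hc3⟩ := hc
          exact hnob (icbrt (n - a * a * a))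
            (PySem.List.mem_pyRange_one.mpr ⟨hc2, by omega⟩) (by omega)
        · exact ih sums first hrel
    | some b =>
      have hbm : b ∈ PySem.List.pyRange |a| (bound + 1) 1 := List.mem_of_find?_eq_some hf
      have hbe : a * a * a + b * b * b = n := by
        have := List.find?_some hf; simpa using this
      rcases PySem.List.mem_pyRange_one.mp hbm with ⟨hb1, hb2⟩
      have hb0 : 0 ≤ b := le_trans (abs_nonneg a) hb1
      have ht : n - a * a * a = b * b * b := by omega
      have htnn : ¬ (n - a * a * a < 0) := by
        have : 0 ≤ b * b * b := by positivity
        omega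
      have hic : icbrt (n - a * a * a) = b := by rw [ht]; exact icbrt_cube b hb0
      simp only [htnn, if_false, hic]
      rw [if_pos ⟨by omega, hb1, by omega⟩]
      rw [hrel]
      cases first with
      | some p =>
        by_cases hp : p = (a, b)
        · simp only [hp, ne_eq, not_true_eq_false, if_false, if_neg]
          exact ih _ _ (PySem.Dict.get?_insert_self sums n (a, b))
        · simp only [ne_eq, hp, not_false_eq_true, if_true, if_pos]
      | none =>
        exact ih _ _ (PySem.Dict.get?_insert_self sums n (a, b))

-- ===== VERDICT (by name: the statement is the Claim_ definition above) =====
theorem is_cabtaxi_spec : Claim_equal_is_cabtaxi := by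
  intro n bound _
  unfold Spec_is_cabtaxi is_cabtaxi is_cabtaxi_alt
  exact outer_eq n bound _ PySem.Dict.empty none (PySem.Dict.get?_empty n)
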